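-- pv_equiv track=rewrite | github.com/spaikius/subseq | subseq/alignment.py | create_alignment_string
-- ===== SOURCE A (Python) =====
-- def create_alignment_string(aligned_seq1, aligned_seq2):
--     """
--     Constructs alignment string for both aligned sequences
--
--     KTGTA
--     :| :|  <-- alignment string
--     PT-KA
--
--     where ':' - mismatch, ' ' - gap, '|' - match
--
--     returns alignment string, match count, mismatch count, gap count
--     """
--     identities, gaps, mismatches = 0, 0, 0
--     alignment_string = ''
--
--     for aa1, aa2 in zip(aligned_seq1, aligned_seq2):
--         if aa1 == aa2:
--             alignment_string += '|'
--             identities += 1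
--
--         elif '-' in (aa1, aa2):
--             alignment_string += ' '
--             gaps += 1
--
--         else:
--             alignment_string += ':'
--             mismatches += 1
--
--     return alignment_string, identities, gaps, mismatches
-- ===== SOURCE B (Python) =====
-- def create_alignment_string(aligned_seq1, aligned_seq2):
--     """
--     Index-set decomposition: find the positions that are matches and the
--     positions that are gaps, start from an all-':' buffer and overwrite
--     those positions; the mismatch count is the complement n - matches - gaps.
--     """
--     n = min(len(aligned_seq1), len(aligned_seq2))
--     s1, s2 = aligned_seq1[:n], aligned_seq2[:n]
--     match_idx = [i for i in range(n) if s1[i] == s2[i]]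
--     gap_idx = [i for i in range(n)
--                if s1[i] != s2[i] and (s1[i] == '-' or s2[i] == '-')]
--     chars = [':'] * n
--     for i in match_idx:
--         chars[i] = '|'
--     for i in gap_idx:
--         chars[i] = ' '
--     return (''.join(chars), len(match_idx), len(gap_idx),
--             n - len(match_idx) - len(gap_idx))
-- ===== Notes on version B (the rewrite author's own statement) =====
-- stated objective: alternative
-- what changed: B replaces A's single classifying loop with four accumulators by an index-set decomposition: two range scans collect the match positions and gap positions, an all-':' buffer is overwritten at those positions to form the string, the first two counts are the set sizes and the mismatch count is the complement n - matches - gaps.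
import Mathlib
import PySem

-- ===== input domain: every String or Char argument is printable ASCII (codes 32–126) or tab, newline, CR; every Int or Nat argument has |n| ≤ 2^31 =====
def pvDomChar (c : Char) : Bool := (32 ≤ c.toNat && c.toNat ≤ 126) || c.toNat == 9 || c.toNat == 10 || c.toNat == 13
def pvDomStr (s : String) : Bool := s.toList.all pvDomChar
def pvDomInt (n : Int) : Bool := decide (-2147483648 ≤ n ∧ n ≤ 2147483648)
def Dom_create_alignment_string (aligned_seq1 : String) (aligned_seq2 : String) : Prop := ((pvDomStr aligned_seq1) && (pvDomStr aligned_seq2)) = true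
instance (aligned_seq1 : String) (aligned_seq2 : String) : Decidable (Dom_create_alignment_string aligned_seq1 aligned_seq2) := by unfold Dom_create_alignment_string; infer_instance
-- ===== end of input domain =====

-- B replaces A's single classifying loop by an index-set decomposition:
-- collect match/gap positions, overwrite an all-':' buffer at them, and
-- obtain the mismatch count as the complement n - matches - gaps.

-- ===== PORT A =====
-- A: one loop over the zipped pairs, carrying four accumulators.
def create_alignment_string (aligned_seq1 : String) (aligned_seq2 : String) : String × Int × Int × Int :=
  let r := (aligned_seq1.toList.zip aligned_seq2.toList).foldl
    (fun (st : String × Int × Int × Int) p =>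
      if p.1 == p.2 then (st.1 ++ "|", st.2.1 + 1, st.2.2.1, st.2.2.2)
      else if p.1 == '-' || p.2 == '-' then (st.1 ++ " ", st.2.1, st.2.2.1 + 1, st.2.2.2)
      else (st.1 ++ ":", st.2.1, st.2.2.1, st.2.2.2 + 1))
    ("", 0, 0, 0)
  r

-- ===== PORT B =====
-- Source B indexes s1[i]/s2[i] only at i < n = len(s1) = len(s2), so getD never pads; exact there.
def create_alignment_string_alt (aligned_seq1 : String) (aligned_seq2 : String) : String × Int × Int × Int :=
  let n := min aligned_seq1.toList.length aligned_seq2.toList.length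
  let s1 := aligned_seq1.toList.take n
  let s2 := aligned_seq2.toList.take n
  let matchIdx := (List.range n).filter (fun i => s1.getD i ' ' == s2.getD i ' ')
  let gapIdx := (List.range n).filter (fun i =>
      s1.getD i ' ' != s2.getD i ' ' && (s1.getD i ' ' == '-' || s2.getD i ' ' == '-'))
  let chars0 := List.replicate n ':'
  let chars1 := matchIdx.foldl (fun cs i => cs.set i '|') chars0
  let chars2 := gapIdx.foldl (fun cs i => cs.set i ' ') chars1
  (String.ofList chars2, (matchIdx.length : Int), (gapIdx.length : Int),
   (n : Int) - matchIdx.length - gapIdx.length)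

-- ===== PRECONDITION & SPEC =====
def Spec_create_alignment_string (aligned_seq1 : String) (aligned_seq2 : String) (out : String × Int × Int × Int) : Prop := out = create_alignment_string_alt aligned_seq1 aligned_seq2
instance (aligned_seq1 : String) (aligned_seq2 : String) (out : String × Int × Int × Int) : Decidable (Spec_create_alignment_string aligned_seq1 aligned_seq2 out) := by unfold Spec_create_alignment_string; infer_instance

-- ===== CLAIM (what is proved, stated in full; the proofs are below) =====
def Claim_equal_create_alignment_string : Prop := ∀ (aligned_seq1 : String) (aligned_seq2 : String), Dom_create_alignment_string aligned_seq1 aligned_seq2 → Spec_create_alignment_string aligned_seq1 aligned_seq2 (create_alignment_string aligned_seq1 aligned_seq2)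

-- ===== LEMMAS AND PROOFS =====

-- the symbol A appends for one zipped pair (proof-side abstraction of A's branch)
def pvSymbol (p : Char × Char) : Char :=
  if p.1 == p.2 then '|'
  else if p.1 == '-' || p.2 == '-' then ' '
  else ':'

lemma pv_str_cons (s : String) (c : Char) (l : List Char) :
    s ++ String.ofList [c] ++ String.ofList l = s ++ String.ofList (c :: l) := by
  rw [String.append_assoc, ← String.ofList_append]; rfl

lemma pv_fold_eq (l : List (Char × Char)) (s : String) (a g m : Int) :
    l.foldl
      (fun (st : String × Int × Int × Int) p =>
        if p.1 == p.2 then (st.1 ++ "|", st.2.1 + 1, st.2.2.1, st.2.2.2)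
        else if p.1 == '-' || p.2 == '-' then (st.1 ++ " ", st.2.1, st.2.2.1 + 1, st.2.2.2)
        else (st.1 ++ ":", st.2.1, st.2.2.1, st.2.2.2 + 1))
      (s, a, g, m)
    = (s ++ String.ofList (l.map pvSymbol),
       a + ((l.map pvSymbol).count '|' : Int),
       g + ((l.map pvSymbol).count ' ' : Int),
       m + ((l.map pvSymbol).count ':' : Int)) := by
  induction l generalizing s a g m with
  | nil => simp
  | cons p t ih =>
    simp only [List.foldl_cons, List.map_cons]
    by_cases h1 : (p.1 == p.2) = true
    · have hs : pvSymbol p = '|' := by simp [pvSymbol, h1]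
      rw [if_pos h1, ih, hs]
      have : s ++ "|" = s ++ String.ofList ['|'] := rfl
      rw [this, pv_str_cons]
      simp [List.count_cons]
      push_cast; omega
    · by_cases h2 : (p.1 == '-' || p.2 == '-') = true
      · have hs : pvSymbol p = ' ' := by simp [pvSymbol, h1, h2]
        rw [if_neg h1, if_pos h2, ih, hs]
        have : s ++ " " = s ++ String.ofList [' '] := rfl
        rw [this, pv_str_cons]
        simp [List.count_cons]
        push_cast; omega
      · have hs : pvSymbol p = ':' := by simp [pvSymbol, h1, h2]
        rw [if_neg h1, if_neg h2, ih, hs]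
        have : s ++ ":" = s ++ String.ofList [':'] := rfl
        rw [this, pv_str_cons]
        simp [List.count_cons]
        push_cast; omega

lemma pv_filter_range_length {α : Type} (l : List α) (d : α) (p : α → Bool) :
    ((List.range l.length).filter (fun i => p (l.getD i d))).length = (l.filter p).length := by
  induction l using List.reverseRecOn with
  | nil => simp
  | append_singleton l a ih =>
    rw [List.length_append, List.length_singleton, List.range_succ, List.filter_append,
        List.filter_append, List.length_append, List.length_append]
    have h1 : (List.range l.length).filter (fun i => p ((l ++ [a]).getD i d))
        = (List.range l.length).filter (fun i => p (l.getD i d)) := by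
      apply List.filter_congr
      intro i hi
      have hi' : i < l.length := List.mem_range.mp hi
      have : (l ++ [a]).getD i d = l.getD i d := by
        simp [List.getD, List.getElem?_append_left hi']
      rw [this]
    have h2 : (l ++ [a]).getD l.length d = a := by
      simp [List.getD]
    rw [h1, ih]
    simp [List.filter, h2]
    cases p a <;> simp

lemma pv_foldl_set_length (is : List Nat) (cs : List Char) (v : Char) :
    (is.foldl (fun cs i => cs.set i v) cs).length = cs.length := by
  induction is generalizing cs with
  | nil => rfl
  | cons i t ih => simp [List.foldl_cons, ih]

lemma pv_getElem?_foldl_set (is : List Nat) (cs : List Char) (v : Char) (j : Nat) :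
    (is.foldl (fun cs i => cs.set i v) cs)[j]? = if j ∈ is ∧ j < cs.length then some v else cs[j]? := by
  induction is generalizing cs with
  | nil => simp
  | cons i t ih =>
    simp only [List.foldl_cons]
    rw [ih]
    simp only [List.length_set, List.getElem?_set, List.mem_cons]
    by_cases h1 : j ∈ t <;> by_cases h2 : j < cs.length <;> by_cases h3 : i = j <;>
      simp [h1, h2, h3, List.getElem?_eq_none] <;> omega

lemma pv_count_sum (l : List (Char × Char)) :
    (l.map pvSymbol).count '|' + (l.map pvSymbol).count ' ' + (l.map pvSymbol).count ':' = l.length := by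
  induction l with
  | nil => rfl
  | cons p t ih =>
    simp only [List.map_cons, List.count_cons]
    by_cases h1 : (p.1 == p.2) = true
    · have hs : pvSymbol p = '|' := by simp [pvSymbol, h1]
      rw [hs]; simp; omega
    · by_cases h2 : (p.1 == '-' || p.2 == '-') = true
      · have hs : pvSymbol p = ' ' := by simp [pvSymbol, h1, h2]
        rw [hs]; simp; omega
      · have hs : pvSymbol p = ':' := by simp [pvSymbol, h1, h2]
        rw [hs]; simp; omega

lemma pvSymbol_bar (p : Char × Char) : (pvSymbol p == '|') = (p.1 == p.2) := by
  unfold pvSymbol; split_ifs with h1 h2 <;> simp_all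

lemma pvSymbol_sp (p : Char × Char) :
    (pvSymbol p == ' ') = (!(p.1 == p.2) && (p.1 == '-' || p.2 == '-')) := by
  unfold pvSymbol; split_ifs with h1 h2 <;> simp_all

lemma pv_count_filter (zl : List (Char × Char)) (c : Char) :
    ((zl.map pvSymbol).count c : Nat)
      = ((List.range zl.length).filter (fun i => pvSymbol (zl.getD i ('|','|')) == c)).length := by
  rw [List.count_eq_countP, List.countP_map, List.countP_eq_length_filter,
      ← pv_filter_range_length zl ('|','|') ((fun x => x == c) ∘ pvSymbol)]
  rfl

set_option maxHeartbeats 1000000 in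
lemma pv_main (st1 st2 : String) :
    create_alignment_string st1 st2 = create_alignment_string_alt st1 st2 := by
  simp only [create_alignment_string, create_alignment_string_alt]
  rw [pv_fold_eq]
  set l1 := st1.toList with hl1
  set l2 := st2.toList with hl2
  set n := min l1.length l2.length with hn
  set zl := l1.zip l2 with hzl
  set M := (List.range n).filter (fun i => (l1.take n).getD i ' ' == (l2.take n).getD i ' ') with hMdef
  set G := (List.range n).filter (fun i =>
      (l1.take n).getD i ' ' != (l2.take n).getD i ' '
        && ((l1.take n).getD i ' ' == '-' || (l2.take n).getD i ' ' == '-')) with hGdef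
  have hn1 : n ≤ l1.length := Nat.min_le_left _ _
  have hn2 : n ≤ l2.length := Nat.min_le_right _ _
  have hzlen : zl.length = n := by simp [hzl, hn]
  have e1 : ∀ j (h : j < n), (l1.take n).getD j ' ' = l1[j]'(lt_of_lt_of_le h hn1) := by
    intro j h
    rw [List.getD_eq_getElem?_getD, List.getElem?_take_of_lt h,
        List.getElem?_eq_getElem (lt_of_lt_of_le h hn1)]
    rfl
  have e2 : ∀ j (h : j < n), (l2.take n).getD j ' ' = l2[j]'(lt_of_lt_of_le h hn2) := by
    intro j h
    rw [List.getD_eq_getElem?_getD, List.getElem?_take_of_lt h,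
        List.getElem?_eq_getElem (lt_of_lt_of_le h hn2)]
    rfl
  have hMj : ∀ j (h : j < n), (j ∈ M ↔ (l1[j]'(lt_of_lt_of_le h hn1) == l2[j]'(lt_of_lt_of_le h hn2)) = true) := by
    intro j h
    rw [hMdef]
    simp only [List.mem_filter, List.mem_range]
    rw [e1 j h, e2 j h]
    simp [h]
  have hGj : ∀ j (h : j < n), (j ∈ G ↔ ((!(l1[j]'(lt_of_lt_of_le h hn1) == l2[j]'(lt_of_lt_of_le h hn2)))
      && (l1[j]'(lt_of_lt_of_le h hn1) == '-' || l2[j]'(lt_of_lt_of_le h hn2) == '-')) = true) := by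
    intro j h
    rw [hGdef]
    simp only [List.mem_filter, List.mem_range]
    rw [e1 j h, e2 j h]
    simp [h, bne]
  have ez : ∀ j (h : j < n), zl.getD j ('|','|')
      = (l1[j]'(lt_of_lt_of_le h hn1), l2[j]'(lt_of_lt_of_le h hn2)) := by
    intro j h
    have hzj : j < zl.length := by omega
    rw [List.getD_eq_getElem?_getD, List.getElem?_eq_getElem hzj]
    simp [hzl, List.getElem_zip]
  -- count of '|' = matches, count of ' ' = gaps
  have hcBar : (zl.map pvSymbol).count '|' = M.length := by
    rw [pv_count_filter, hzlen, hMdef]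
    congr 1
    apply List.filter_congr
    intro i hi
    have h : i < n := List.mem_range.mp hi
    simp only [ez i h, e1 i h, e2 i h, pvSymbol_bar]
  have hcSp : (zl.map pvSymbol).count ' ' = G.length := by
    rw [pv_count_filter, hzlen, hGdef]
    congr 1
    apply List.filter_congr
    intro i hi
    have h : i < n := List.mem_range.mp hi
    simp only [ez i h, e1 i h, e2 i h, pvSymbol_sp]
    simp [bne]
  have hsum : (zl.map pvSymbol).count '|' + (zl.map pvSymbol).count ' '
      + (zl.map pvSymbol).count ':' = n := by rw [pv_count_sum, hzlen]
  -- the alignment string: pointwise equality of the two character lists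
  have hlist : zl.map pvSymbol
      = G.foldl (fun cs i => cs.set i ' ') (M.foldl (fun cs i => cs.set i '|') (List.replicate n ':')) := by
    apply List.ext_getElem?
    intro j
    have hlen1 : (M.foldl (fun cs i => cs.set i '|') (List.replicate n ':')).length = n := by
      rw [pv_foldl_set_length, List.length_replicate]
    rw [List.getElem?_map, pv_getElem?_foldl_set, pv_getElem?_foldl_set, hlen1, List.length_replicate]
    by_cases hj : j < n
    · have hzj : j < zl.length := by omega
      rw [List.getElem?_eq_getElem hzj]
      have hz : zl[j] = (l1[j]'(lt_of_lt_of_le hj hn1), l2[j]'(lt_of_lt_of_le hj hn2)) := by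
        simp [hzl, List.getElem_zip]
      by_cases hEq : (l1[j]'(lt_of_lt_of_le hj hn1) == l2[j]'(lt_of_lt_of_le hj hn2)) = true
      · have hnG : ¬ (j ∈ G ∧ j < n) := by
          rintro ⟨hg, -⟩
          rw [hGj j hj] at hg
          simp [hEq] at hg
        rw [if_neg hnG, if_pos ⟨(hMj j hj).mpr hEq, hj⟩]
        simp [hz, pvSymbol, hEq]
      · by_cases hD : (l1[j]'(lt_of_lt_of_le hj hn1) == '-' || l2[j]'(lt_of_lt_of_le hj hn2) == '-') = true
        · rw [if_pos ⟨(hGj j hj).mpr (by simp [hEq, hD]), hj⟩]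
          simp [hz, pvSymbol, hEq, hD]
        · have hnG : ¬ (j ∈ G ∧ j < n) := by
            rintro ⟨hg, -⟩
            rw [hGj j hj] at hg
            simp [hEq, hD] at hg
          have hnM : ¬ (j ∈ M ∧ j < n) := by
            rintro ⟨hm, -⟩
            rw [hMj j hj] at hm
            exact hEq hm
          rw [if_neg hnG, if_neg hnM]
          simp [hz, pvSymbol, hEq, hD, List.getElem?_replicate, hj]
    · have hzj : zl.length ≤ j := by omega
      rw [List.getElem?_eq_none hzj]
      have hnG : ¬ (j ∈ G ∧ j < n) := fun h => hj h.2
      have hnM : ¬ (j ∈ M ∧ j < n) := fun h => hj h.2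
      rw [if_neg hnG, if_neg hnM]
      simp [List.getElem?_replicate, hj]
  simp only [Prod.mk.injEq]
  refine ⟨?_, ?_, ?_, ?_⟩
  · rw [hlist]; simp
  · rw [hcBar]; push_cast; ring
  · rw [hcSp]; push_cast; ring
  · rw [hcBar, hcSp] at hsum
    push_cast
    omega

-- ===== VERDICT (by name: the statement is the Claim_ definition above) =====
theorem create_alignment_string_spec : Claim_equal_create_alignment_string := by
  intro s1 s2 _
  unfold Spec_create_alignment_string
  exact pv_main s1 s2
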